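-- pv_equiv track=rewrite | github.com/oevkaya/GAIL-DS-project | llmds/scripts/collect_results.py | split_by_user
-- ===== SOURCE A (Python) =====
-- def split_by_user(messages):
--     """Used for sequential questions.
--     Separate the outcomes into per question.
--     """
--     conversations = []
--     current = []
--
--     for msg in messages:
--         if msg.startswith('Role: user'):
--             if current:
--                 conversations.append(current)
--             current = [msg]  # start new block
--         else:
--             current.append(msg)
--
--     if current:
--         conversations.append(current)  # add the last block
--
--     return conversations
-- ===== SOURCE B (Python) =====
-- def split_by_user(messages):
--     """Index-then-slice decomposition: find each user-message boundary by
--     scanning, and emit each conversation as one slice of the input."""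
--     def is_user(m):
--         return m.startswith('Role: user')
--
--     n = len(messages)
--     k = 0
--     while k < n and not is_user(messages[k]):
--         k += 1
--     res = [messages[:k]] if k > 0 else []
--     while k < n:
--         j = k + 1
--         while j < n and not is_user(messages[j]):
--             j += 1
--         res.append(messages[k:j])
--         k = j
--     return res
-- ===== Notes on version B (the rewrite author's own statement) =====
-- stated objective: alternative
-- what changed: Replaces A's stateful accumulate/flush loop (growing a 'current' list element by element) with an index-then-slice structure: scan for the next user boundary and emit each conversation as a single slice messages[k:j].
import Mathlib
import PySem

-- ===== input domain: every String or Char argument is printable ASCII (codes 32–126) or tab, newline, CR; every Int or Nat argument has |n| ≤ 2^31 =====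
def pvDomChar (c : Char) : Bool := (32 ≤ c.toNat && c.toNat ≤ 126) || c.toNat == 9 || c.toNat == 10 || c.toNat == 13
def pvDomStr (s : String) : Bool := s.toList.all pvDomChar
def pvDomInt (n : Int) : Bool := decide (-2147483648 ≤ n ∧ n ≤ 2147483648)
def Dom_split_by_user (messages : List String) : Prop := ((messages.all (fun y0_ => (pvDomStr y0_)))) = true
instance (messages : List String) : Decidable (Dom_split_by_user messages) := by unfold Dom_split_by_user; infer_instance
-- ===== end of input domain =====

-- B replaces A's stateful accumulate/flush loop with an index-then-slice scan; alternative decomposition, same cost.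

-- ===== PORT A =====
-- the for-loop of A, state = (conversations, current)
def pvLoopA (convs : List (List String)) (current : List String) :
    List String → List (List String) × List String
  | [] => (convs, current)
  | msg :: rest =>
      if PySem.Str.startswith msg "Role: user" then
        pvLoopA (if current = [] then convs else convs ++ [current]) [msg] rest
      else
        pvLoopA convs (current ++ [msg]) rest

def split_by_user (messages : List String) : List (List String) :=
  let st := pvLoopA [] [] messages
  if st.2 = [] then st.1 else st.1 ++ [st.2]

-- ===== PORT B =====
def pvIsUser (m : String) : Bool := PySem.Str.startswith m "Role: user"

-- `while j < n and not is_user(messages[j]): j += 1`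
-- (messages.getD j "" is exact here: the loop only reads messages[j] when j < n = len(messages))
def pvScan (messages : List String) (n j : Nat) : Nat :=
  if _h : j < n then
    if pvIsUser (messages.getD j "") then j else pvScan messages n (j + 1)
  else j
termination_by n - j

theorem pvScan_ge (messages : List String) (n j : Nat) : j ≤ pvScan messages n j := by
  unfold pvScan
  split
  · split
    · exact le_refl j
    · exact le_trans (Nat.le_succ j) (pvScan_ge messages n (j + 1))
  · exact le_refl j
termination_by n - j

-- the outer `while k < n` loop of B, res the accumulated result
def pvOuterB (messages : List String) (n k : Nat) (res : List (List String)) :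
    List (List String) :=
  if _h : k < n then
    pvOuterB messages n (pvScan messages n (k + 1))
      (res ++ [PySem.List.slice messages (some (k : Int)) (some ((pvScan messages n (k + 1) : Nat) : Int))])
  else res
termination_by n - k
decreasing_by
  have := pvScan_ge messages n (k + 1)
  omega

def split_by_user_alt (messages : List String) : List (List String) :=
  pvOuterB messages messages.length (pvScan messages messages.length 0)
    (if 0 < pvScan messages messages.length 0 then
      [PySem.List.slice messages none (some ((pvScan messages messages.length 0 : Nat) : Int))]
     else [])

-- ===== PRECONDITION & SPEC =====
def Spec_split_by_user (messages : List String) (out : List (List String)) : Prop := out = split_by_user_alt messages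
instance (messages : List String) (out : List (List String)) : Decidable (Spec_split_by_user messages out) := by unfold Spec_split_by_user; infer_instance

-- ===== CLAIM (what is proved, stated in full; the proofs are below) =====
def Claim_equal_split_by_user : Prop := ∀ (messages : List String), Dom_split_by_user messages → Spec_split_by_user messages (split_by_user messages)

-- ===== LEMMAS AND PROOFS =====

-- canonical characterisation both ports are reduced to: span off the non-user prefix
def pvSpanNU : List String → List String × List String
  | [] => ([], [])
  | m :: ms =>
      if pvIsUser m then ([], m :: ms)
      else (m :: (pvSpanNU ms).1, (pvSpanNU ms).2)

theorem pvSpanNU_nil : pvSpanNU [] = ([], []) := rfl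

theorem pvSpanNU_cons_user {m : String} {ms : List String} (h : pvIsUser m = true) :
    pvSpanNU (m :: ms) = ([], m :: ms) := by simp [pvSpanNU, h]

theorem pvSpanNU_cons_nonuser {m : String} {ms : List String} (h : pvIsUser m = false) :
    pvSpanNU (m :: ms) = (m :: (pvSpanNU ms).1, (pvSpanNU ms).2) := by simp [pvSpanNU, h]

theorem pvSpanNU_len (ms : List String) : (pvSpanNU ms).2.length ≤ ms.length := by
  induction ms with
  | nil => simp [pvSpanNU_nil]
  | cons m ms ih =>
      by_cases h : pvIsUser m
      · simp [pvSpanNU_cons_user h]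
      · rw [pvSpanNU_cons_nonuser (by simpa using h)]
        simpa using le_trans ih (Nat.le_succ _)

def pvGroups : List String → List (List String)
  | [] => []
  | m :: ms => (m :: (pvSpanNU ms).1) :: pvGroups (pvSpanNU ms).2
termination_by ms => ms.length
decreasing_by
  have := pvSpanNU_len ms
  simp only [List.length_cons]
  omega

theorem pvGroups_nil : pvGroups [] = [] := by rw [pvGroups]

theorem pvGroups_cons (m : String) (ms : List String) :
    pvGroups (m :: ms) = (m :: (pvSpanNU ms).1) :: pvGroups (pvSpanNU ms).2 := by
  rw [pvGroups]

theorem pvSpanNU_append (ms : List String) :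
    (pvSpanNU ms).1 ++ (pvSpanNU ms).2 = ms := by
  induction ms with
  | nil => simp [pvSpanNU_nil]
  | cons m ms ih =>
      by_cases h : pvIsUser m
      · simp [pvSpanNU_cons_user h]
      · rw [pvSpanNU_cons_nonuser (by simpa using h)]
        simpa using ih

theorem pvSpanNU_drop (ms : List String) :
    ms.drop (pvSpanNU ms).1.length = (pvSpanNU ms).2 := by
  rcases hab : pvSpanNU ms with ⟨a, b⟩
  have h := pvSpanNU_append ms
  rw [hab] at h
  rw [← h]
  exact List.drop_left

theorem pvSpanNU_take (ms : List String) :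
    ms.take (pvSpanNU ms).1.length = (pvSpanNU ms).1 := by
  rcases hab : pvSpanNU ms with ⟨a, b⟩
  have h := pvSpanNU_append ms
  rw [hab] at h
  rw [← h]
  exact List.take_left

theorem pvSpanNU_head (ms : List String) :
    (pvSpanNU ms).2 = [] ∨ ∃ m t, (pvSpanNU ms).2 = m :: t ∧ pvIsUser m = true := by
  induction ms with
  | nil => exact Or.inl rfl
  | cons m ms ih =>
      by_cases h : pvIsUser m
      · rw [pvSpanNU_cons_user h]
        exact Or.inr ⟨m, ms, rfl, h⟩
      · rw [pvSpanNU_cons_nonuser (by simpa using h)]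
        exact ih

-- ---------- A-side: split_by_user = span-prefix ++ groups ----------
def pvFinish (st : List (List String) × List String) : List (List String) :=
  if st.2 = [] then st.1 else st.1 ++ [st.2]

theorem pvLoopA_shift (ms : List String) (convs : List (List String)) (current : List String) :
    pvFinish (pvLoopA convs current ms) = convs ++ pvFinish (pvLoopA [] current ms) := by
  induction ms generalizing convs current with
  | nil =>
      by_cases h : current = [] <;> simp [pvLoopA, pvFinish, h]
  | cons m ms ih =>
      simp only [pvLoopA]
      split
      · rw [ih (if current = [] then convs else convs ++ [current]) [m],
            ih (if current = [] then [] else [] ++ [current]) [m]]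
        by_cases h : current = [] <;> simp [h]
      · exact ih _ _

theorem pvLoopA_spec (ms : List String) : ∀ current : List String, current ≠ [] →
    pvFinish (pvLoopA [] current ms) =
      (current ++ (pvSpanNU ms).1) :: pvGroups (pvSpanNU ms).2 := by
  induction ms with
  | nil =>
      intro current h
      simp [pvLoopA, pvFinish, h, pvSpanNU_nil, pvGroups_nil]
  | cons m ms ih =>
      intro current h
      by_cases hu : pvIsUser m = true
      · have hs : PySem.Str.startswith m "Role: user" = true := hu
        rw [pvLoopA]
        simp only [hs, reduceIte]
        rw [if_neg h, pvLoopA_shift, ih [m] (by simp),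
            pvSpanNU_cons_user hu, pvGroups_cons]
        simp
      · have hs : PySem.Str.startswith m "Role: user" = false := by
          simpa [pvIsUser] using hu
        rw [pvLoopA]
        simp only [hs, Bool.false_eq_true, reduceIte]
        rw [ih (current ++ [m]) (by simp),
            pvSpanNU_cons_nonuser (by simpa using hu)]
        simp

theorem split_by_user_eq (messages : List String) :
    split_by_user messages =
      (if (pvSpanNU messages).1 = [] then [] else [(pvSpanNU messages).1]) ++
        pvGroups (pvSpanNU messages).2 := by
  cases messages with
  | nil => simp [split_by_user, pvLoopA, pvSpanNU_nil, pvGroups_nil]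
  | cons m ms =>
      have hA : split_by_user (m :: ms) = pvFinish (pvLoopA [] [] (m :: ms)) := rfl
      rw [hA, pvLoopA]
      by_cases hu : pvIsUser m = true
      · have hs : PySem.Str.startswith m "Role: user" = true := hu
        simp only [hs, reduceIte]
        rw [pvLoopA_spec ms [m] (by simp),
            pvSpanNU_cons_user hu, pvGroups_cons]
        simp
      · have hs : PySem.Str.startswith m "Role: user" = false := by
          simpa [pvIsUser] using hu
        simp only [hs, Bool.false_eq_true, reduceIte, List.nil_append]
        rw [pvLoopA_spec ms [m] (by simp),
            pvSpanNU_cons_nonuser (by simpa using hu)]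
        simp

-- ---------- B-side ----------
theorem pvScan_spec (ms : List String) (j : Nat) :
    pvScan ms ms.length j = j + (pvSpanNU (ms.drop j)).1.length := by
  unfold pvScan
  by_cases h : j < ms.length
  · rw [dif_pos h]
    have hd : ms.drop j = ms.getD j "" :: ms.drop (j + 1) := by
      rw [List.drop_eq_getElem_cons h, List.getD_eq_getElem?_getD, List.getElem?_eq_getElem h]
      rfl
    rw [hd]
    by_cases hu : pvIsUser (ms.getD j "") = true
    · rw [if_pos hu, pvSpanNU_cons_user hu]
      simp
    · rw [if_neg hu, pvSpanNU_cons_nonuser (by simpa using hu),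
          pvScan_spec ms (j + 1)]
      simp only [List.length_cons]
      omega
  · rw [dif_neg h]
    rw [List.drop_eq_nil_of_le (by omega), pvSpanNU_nil]
    simp
termination_by ms.length - j

theorem pvOuterB_spec (ms : List String) (k : Nat) (res : List (List String))
    (hk : k ≤ ms.length)
    (hhead : ms.drop k = [] ∨ ∃ m t, ms.drop k = m :: t ∧ pvIsUser m = true) :
    pvOuterB ms ms.length k res = res ++ pvGroups (ms.drop k) := by
  unfold pvOuterB
  by_cases h : k < ms.length
  · rcases hhead with hnil | ⟨m, t, hd, hu⟩
    · exfalso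
      have := congrArg List.length hnil
      simp at this
      omega
    have h2 := (List.drop_eq_getElem_cons h).symm.trans hd
    injection h2 with hm ht'
    have hscan : pvScan ms ms.length (k + 1) =
        k + 1 + (pvSpanNU (ms.drop (k + 1))).1.length := by
      have := pvScan_spec ms (k + 1)
      omega
    set len := (pvSpanNU (ms.drop (k + 1))).1.length with hlen
    have hlenle : len + (pvSpanNU (ms.drop (k + 1))).2.length + (k + 1) = ms.length := by
      have := congrArg List.length (pvSpanNU_append (ms.drop (k + 1)))
      simp at this
      omega
    have hk1 : k + 1 + len ≤ ms.length := by omega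
    have hslice : PySem.List.slice ms (some (k : Int)) (some ((k + 1 + len : Nat) : Int)) =
        m :: (pvSpanNU (ms.drop (k + 1))).1 := by
      rw [PySem.List.slice_natCast, show (k + 1 + len) - k = len + 1 by omega,
          List.drop_eq_getElem_cons h, hm, List.take_succ_cons]
      congr 1
      exact pvSpanNU_take (ms.drop (k + 1))
    have hdropj : ms.drop (k + 1 + len) = (pvSpanNU (ms.drop (k + 1))).2 := by
      have h3 := pvSpanNU_drop (ms.drop (k + 1))
      rw [List.drop_drop] at h3
      exact h3
    rw [dif_pos h, hscan,
        pvOuterB_spec ms (k + 1 + len) _ hk1 (by rw [hdropj]; exact pvSpanNU_head _),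
        hdropj, hslice, hd, pvGroups_cons, ← ht']
    simp
  · rw [dif_neg h, List.drop_eq_nil_of_le (by omega), pvGroups_nil, List.append_nil]
termination_by ms.length - k
decreasing_by omega

theorem split_by_user_alt_eq (messages : List String) :
    split_by_user_alt messages =
      (if (pvSpanNU messages).1 = [] then [] else [(pvSpanNU messages).1]) ++
        pvGroups (pvSpanNU messages).2 := by
  unfold split_by_user_alt
  have h0 : pvScan messages messages.length 0 = (pvSpanNU messages).1.length := by
    simpa using pvScan_spec messages 0
  have hlen : (pvSpanNU messages).1.length ≤ messages.length := by
    have := congrArg List.length (pvSpanNU_append messages)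
    simp at this
    omega
  rw [h0, pvOuterB_spec messages (pvSpanNU messages).1.length _ hlen
        (by rw [pvSpanNU_drop]; exact pvSpanNU_head _),
      pvSpanNU_drop]
  congr 1
  by_cases h : (pvSpanNU messages).1 = []
  · simp [h]
  · have hpos : 0 < (pvSpanNU messages).1.length := List.length_pos_iff.mpr h
    rw [if_pos hpos, if_neg h, PySem.List.slice_to_natCast, pvSpanNU_take]

-- ===== VERDICT (by name: the statement is the Claim_ definition above) =====
theorem split_by_user_spec : Claim_equal_split_by_user := by
  intro messages _
  unfold Spec_split_by_user
  rw [split_by_user_eq, split_by_user_alt_eq]
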